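-- pv_equiv track=rewrite | github.com/Loparc/Achurch | achurch_Telegram.py | novaVar
-- ===== SOURCE A (Python) =====
-- import string
--
-- lista_letras = list(string.ascii_lowercase)
--
-- def novaVar(used_variables: set[str]) -> str:
--     n = len(lista_letras)
--     ll = lista_letras
--     while True:
--         i = 0
--         while i < n:
--             # iterem per totes les lletres del diccionari fins a trobar una que no estigui utilitzada
--             new_var = ll[i]
--             if new_var not in used_variables:
--                 return new_var
--             i += 1
--         # no hem trobat cap lletra empty, provem amb una llista amb les lletres i un '
--         ii = 0
--         ll2 = []
--         while ii < n:
--             ll2.append(ll[ii]+'\'')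
--             ii += 1
--         ll = ll2
-- ===== SOURCE B (Python) =====
-- import string
--
-- def novaVar(used_variables: set[str]) -> str:
--     # Index what is occupied: apostrophe-count k -> set of lowercase letters used at that level.
--     occupied = {}
--     for s in used_variables:
--         if s and s[0] in string.ascii_lowercase and all(ch == "'" for ch in s[1:]):
--             occupied.setdefault(len(s) - 1, set()).add(s[0])
--     k = 0
--     while True:
--         level = occupied.get(k, set())
--         for letter in string.ascii_lowercase:
--             if letter not in level:
--                 return letter + "'" * k
--         k += 1
-- ===== Notes on version B (the rewrite author's own statement) =====
-- stated objective: alternative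
-- what changed: B scans used_variables once to build an index mapping apostrophe-count k to the set of lowercase letters occupied at that level, then reads off the first free letter level by level, instead of A's rebuilding the whole 26-candidate list at each level and probing every candidate against the set.
import Mathlib
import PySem

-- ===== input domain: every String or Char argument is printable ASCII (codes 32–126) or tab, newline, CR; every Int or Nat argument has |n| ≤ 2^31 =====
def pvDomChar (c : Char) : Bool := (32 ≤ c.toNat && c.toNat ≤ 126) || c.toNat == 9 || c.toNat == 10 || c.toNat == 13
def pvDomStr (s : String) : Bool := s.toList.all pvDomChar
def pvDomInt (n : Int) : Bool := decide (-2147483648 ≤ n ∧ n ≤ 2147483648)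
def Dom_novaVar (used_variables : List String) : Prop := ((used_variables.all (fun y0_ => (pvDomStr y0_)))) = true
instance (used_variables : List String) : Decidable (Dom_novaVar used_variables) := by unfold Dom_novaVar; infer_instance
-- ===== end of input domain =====

-- B builds a one-pass index (apostrophe-level -> set of occupied letters) and reads the answer
-- off the index, instead of A's re-testing every candidate of every level against the set (alternative decomposition).
-- Both Pythons loop `while True`; the loop always returns after at most len(used)//26 + 1 levels
-- (a level is exhausted only if all 26 of its candidate strings are in used), so both ports carry
-- fuel `used.length + 1`, which is never exhausted; the "" default is unreachable.

-- ===== PORT A =====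
def pvListaLetras : List String :=
  ["a","b","c","d","e","f","g","h","i","j","k","l","m","n","o","p","q","r","s","t","u","v","w","x","y","z"]

-- inner `while i < n` scan: first candidate of the current level not in used_variables
def pvInnerA (used : List String) : List String → Option String
  | [] => none
  | v :: rest => if !(used.contains v) then some v else pvInnerA used rest

-- outer `while True` loop: try the level, else append one apostrophe to every candidate (fuel; see header)
def pvLoopA (used : List String) : List String → Nat → String
  | _, 0 => ""
  | ll, fuel+1 =>
    match pvInnerA used ll with
    | some v => v
    | none => pvLoopA used (ll.map (fun s => s ++ "'")) fuel

def novaVar (used_variables : List String) : String :=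
  pvLoopA used_variables pvListaLetras (used_variables.length + 1)

-- ===== PORT B =====
def pvLowercase : List Char := "abcdefghijklmnopqrstuvwxyz".toList

-- one step of the indexing pass: parse s as letter + apostrophes, record its letter at its level
def pvIndexStep (d : PySem.Dict Int (PySem.Set String)) (s : String) : PySem.Dict Int (PySem.Set String) :=
  match s.toList with
  | [] => d
  | c :: rest =>
    if pvLowercase.contains c && rest.all (fun ch => ch == '\'') then
      d.insert ((rest.length : Int))
        (PySem.Set.add (d.getD ((rest.length : Int)) PySem.Set.empty) (String.ofList [c]))
    else d

def pvIndex (used : List String) : PySem.Dict Int (PySem.Set String) :=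
  used.foldl pvIndexStep PySem.Dict.empty

-- `while True` over levels k (fuel; see header): first free letter at level k, else k+1
def pvLoopB (table : PySem.Dict Int (PySem.Set String)) : Nat → Nat → String
  | _, 0 => ""
  | k, fuel+1 =>
    let level := table.getD ((k : Int)) PySem.Set.empty
    match pvLowercase.find? (fun c => !(PySem.Set.contains level (String.ofList [c]))) with
    | some c => String.ofList [c] ++ String.ofList (List.replicate k '\'')
    | none => pvLoopB table (k+1) fuel

def novaVar_alt (used_variables : List String) : String :=
  pvLoopB (pvIndex used_variables) 0 (used_variables.length + 1)

-- ===== PRECONDITION & SPEC =====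
def Spec_novaVar (used_variables : List String) (out : String) : Prop := out = novaVar_alt used_variables
instance (used_variables : List String) (out : String) : Decidable (Spec_novaVar used_variables out) := by unfold Spec_novaVar; infer_instance

-- ===== CLAIM (what is proved, stated in full; the proofs are below) =====
def Claim_equal_novaVar : Prop := ∀ (used_variables : List String), Dom_novaVar used_variables → Spec_novaVar used_variables (novaVar used_variables)

-- ===== LEMMAS AND PROOFS =====

-- the candidate string of letter c at level k
def pvCand (k : Nat) (c : Char) : String := String.ofList (c :: List.replicate k '\'')

lemma pvOfList_append (a b : List Char) :
    String.ofList a ++ String.ofList b = String.ofList (a ++ b) := by simp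

lemma pvCand_succ (k : Nat) (c : Char) : pvCand k c ++ "'" = pvCand (k+1) c := by
  show pvCand k c ++ String.ofList ['\''] = pvCand (k+1) c
  rw [pvCand, pvOfList_append]
  exact congrArg String.ofList (by simp [List.replicate_succ'])

lemma pvCand_eq_iff (k : Nat) (c : Char) (s : String) (c' : Char) (rest : List Char)
    (hs : s.toList = c' :: rest) :
    pvCand k c = s ↔ c = c' ∧ List.replicate k '\'' = rest := by
  constructor
  · intro h
    have h2 : (pvCand k c).toList = s.toList := by rw [h]
    rw [hs] at h2
    simp [pvCand] at h2
    exact h2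
  · rintro ⟨h1, h2⟩
    have : (pvCand k c).toList = s.toList := by simp [pvCand, hs, h1, h2]
    calc pvCand k c = String.ofList (pvCand k c).toList := by simp
    _ = String.ofList s.toList := by rw [this]
    _ = s := by simp

lemma pvInnerA_map (used : List String) (f : Char → String) (l : List Char) :
    pvInnerA used (l.map f) = (l.find? (fun c => !(used.contains (f c)))).map f := by
  induction l with
  | nil => rfl
  | cons a t ih =>
    by_cases h : f a ∈ used
    · simp [pvInnerA, h, ih]
    · simp [pvInnerA, h]

lemma pvFind?_congr {l : List Char} {p q : Char → Bool} (h : ∀ c ∈ l, p c = q c) :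
    l.find? p = l.find? q := by
  induction l with
  | nil => rfl
  | cons a t ih =>
    have ha := h a (by simp)
    by_cases hp : p a = true
    · simp [hp, ha ▸ hp]
    · simp at hp
      have hq : q a = false := ha ▸ hp
      simp [hp, hq]
      exact ih (fun c hc => h c (by simp [hc]))

-- one indexing step seen through membership at level k
lemma pvIndexStep_mem (d : PySem.Dict Int (PySem.Set String)) (s : String) (k : Nat) (c : Char)
    (hc : c ∈ pvLowercase) :
    String.ofList [c] ∈ (pvIndexStep d s).getD ((k : Int)) PySem.Set.empty ↔
      String.ofList [c] ∈ d.getD ((k : Int)) PySem.Set.empty ∨ pvCand k c = s := by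
  rcases hlist : s.toList with _ | ⟨c', rest⟩
  · have hne : pvCand k c ≠ s := by
      intro h
      have h2 : (pvCand k c).toList = s.toList := by rw [h]
      rw [hlist] at h2
      simp [pvCand] at h2
    simp [pvIndexStep, hlist, hne]
  · rw [pvCand_eq_iff k c s c' rest hlist]
    by_cases hpat : (pvLowercase.contains c' && rest.all (fun ch => ch == '\'')) = true
    · have hpat' : (c' ∈ pvLowercase) ∧ (∀ x ∈ rest, x = '\'') := by simpa using hpat
      have hrest : rest = List.replicate rest.length '\'' :=
        List.eq_replicate_of_mem hpat'.2
      simp only [pvIndexStep, hlist, hpat, if_true]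
      rw [PySem.Dict.getD_insert]
      by_cases hk : k = rest.length
      · subst hk
        rw [if_pos rfl, PySem.Set.mem_add]
        constructor
        · rintro (h | h)
          · exact Or.inl h
          · have h2 : (String.ofList [c]).toList = (String.ofList [c']).toList := by rw [h]
            have hcc : c = c' := by simpa using h2
            exact Or.inr ⟨hcc, hrest.symm⟩
        · rintro (h | ⟨h1, -⟩)
          · exact Or.inl h
          · exact Or.inr (by simp [h1])
      · rw [if_neg (by exact_mod_cast hk)]
        have hne2 : ¬(c = c' ∧ List.replicate k '\'' = rest) := by
          rintro ⟨-, h2⟩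
          exact hk (by simpa using congrArg List.length h2)
        simp [hne2]
    · have hpat' : ¬((c' ∈ pvLowercase) ∧ ∀ x ∈ rest, x = '\'') := by simpa using hpat
      have hne2 : ¬(c = c' ∧ List.replicate k '\'' = rest) := by
        rintro ⟨h1, h2⟩
        exact hpat' ⟨h1 ▸ hc, fun x hx => List.eq_of_mem_replicate (h2 ▸ hx)⟩
      simp [pvIndexStep, hlist, hpat', hne2]

lemma pvIndex_mem (l : List String) (d : PySem.Dict Int (PySem.Set String)) (k : Nat) (c : Char)
    (hc : c ∈ pvLowercase) :
    String.ofList [c] ∈ (l.foldl pvIndexStep d).getD ((k : Int)) PySem.Set.empty ↔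
      String.ofList [c] ∈ d.getD ((k : Int)) PySem.Set.empty ∨ pvCand k c ∈ l := by
  induction l generalizing d with
  | nil => simp
  | cons s t ih =>
    simp only [List.foldl_cons]
    rw [ih, pvIndexStep_mem d s k c hc, List.mem_cons]
    tauto

-- the per-candidate test of A equals the index lookup of B, at every level
lemma pvTest_eq (used : List String) (k : Nat) (c : Char) (hc : c ∈ pvLowercase) :
    (!(used.contains (pvCand k c))) =
      (!(PySem.Set.contains ((pvIndex used).getD ((k : Int)) PySem.Set.empty) (String.ofList [c]))) := by
  have h : String.ofList [c] ∈ (used.foldl pvIndexStep PySem.Dict.empty).getD ((k : Int)) PySem.Set.empty ↔ pvCand k c ∈ used := by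
    rw [pvIndex_mem used PySem.Dict.empty k c hc]
    simp [PySem.Set.empty]
  simp only [pvIndex]
  simp [PySem.Set.contains]
  exact h.symm

lemma pvLoop_eq (used : List String) (fuel : Nat) :
    ∀ k : Nat, pvLoopA used (pvLowercase.map (pvCand k)) fuel = pvLoopB (pvIndex used) k fuel := by
  induction fuel with
  | zero => intro k; rfl
  | succ fuel ih =>
    intro k
    simp only [pvLoopA, pvLoopB]
    rw [pvInnerA_map]
    have hfind : pvLowercase.find? (fun c => !(used.contains (pvCand k c))) =
        pvLowercase.find? (fun c => !(PySem.Set.contains ((pvIndex used).getD ((k : Int)) PySem.Set.empty) (String.ofList [c]))) :=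
      pvFind?_congr (fun c hc => pvTest_eq used k c hc)
    rw [hfind]
    rcases hres : pvLowercase.find? (fun c => !(PySem.Set.contains ((pvIndex used).getD ((k : Int)) PySem.Set.empty) (String.ofList [c]))) with _ | c
    · simp only [Option.map_none]
      have hmap : (pvLowercase.map (pvCand k)).map (fun s => s ++ "'") = pvLowercase.map (pvCand (k+1)) := by
        rw [List.map_map]
        exact List.map_congr_left (fun c _ => pvCand_succ k c)
      rw [hmap]
      exact ih (k+1)
    · simp only [Option.map_some]
      show pvCand k c = String.ofList [c] ++ String.ofList (List.replicate k '\'')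
      rw [pvOfList_append]
      rfl

lemma pvListaLetras_eq : pvListaLetras = pvLowercase.map (pvCand 0) := by decide

-- ===== VERDICT (by name: the statement is the Claim_ definition above) =====
theorem novaVar_spec : Claim_equal_novaVar := by
  intro used _
  show novaVar used = novaVar_alt used
  unfold novaVar novaVar_alt
  rw [pvListaLetras_eq]
  exact pvLoop_eq used (used.length + 1) 0
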